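-- pv_equiv track=rewrite | github.com/anton1k/mfti-homework | lesson_11/test_2.py | count_trajectories
-- ===== SOURCE A (Python) =====
-- def count_trajectories(N):
--     K = [0, 1, 2] + [0]*N
--     for i in range(3, N+1):
--         if i%3==0:
--             K[i] = K[i-1] + K[i-2] + K[i//3]
--         else:
--             K[i] = K[i-1] + K[i-2]
--     return K[N]
-- ===== SOURCE B (Python) =====
-- def count_trajectories(N):
--     if N < 3:
--         return [0, 1, 2][N]
--     memo = {0: 0, 1: 1, 2: 2}
--     stack = [(N, False)]            # (index, ready) frames: top-down DFS with an explicit stack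
--     while stack:
--         i, ready = stack.pop()
--         if ready:                   # both predecessors are memoized now
--             v = memo[i - 1] + memo[i - 2]
--             if i % 3 == 0:
--                 v += memo[i // 3]
--             memo[i] = v
--         elif i >= 3 and i not in memo:   # indices below 3 are pre-seeded
--             stack.append((i, True))
--             stack.append((i - 1, False))
--             stack.append((i - 2, False))
--     return memo[N]
-- ===== Notes on version B (the rewrite author's own statement) =====
-- stated objective: alternative
-- what changed: Replaces A's bottom-up loop filling an O(N) array with a top-down memoized evaluation of the recurrence, driven by an explicit stack of (index, ready) frames and a dictionary memo.
import Mathlib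
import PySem

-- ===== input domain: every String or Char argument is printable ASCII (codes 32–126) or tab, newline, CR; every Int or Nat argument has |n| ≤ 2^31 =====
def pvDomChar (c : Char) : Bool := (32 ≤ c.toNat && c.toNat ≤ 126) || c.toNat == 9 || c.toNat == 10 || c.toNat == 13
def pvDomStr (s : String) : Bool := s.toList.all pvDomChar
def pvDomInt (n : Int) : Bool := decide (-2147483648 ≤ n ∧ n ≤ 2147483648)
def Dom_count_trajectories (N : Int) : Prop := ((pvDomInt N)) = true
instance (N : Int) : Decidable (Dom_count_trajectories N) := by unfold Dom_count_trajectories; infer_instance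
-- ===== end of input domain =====

-- B replaces A's bottom-up array DP with a top-down memoized evaluation of the same
-- recurrence, driven by an explicit stack of (index, ready) frames and a dict memo.

-- ===== PORT A =====
-- one loop step of A: K[i] = K[i-1] + K[i-2] (+ K[i//3] when i%3==0)
def ctStepA (K : List Int) (i : Int) : List Int :=
  if PySem.Int.mod i 3 == 0 then
    PySem.List.pySetD K i (PySem.List.pyGetD K (i-1) 0 + PySem.List.pyGetD K (i-2) 0 +
      PySem.List.pyGetD K (PySem.Int.floordiv i 3) 0)
  else
    PySem.List.pySetD K i (PySem.List.pyGetD K (i-1) 0 + PySem.List.pyGetD K (i-2) 0)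

def count_trajectories (N : Int) : Int :=
  let K0 : List Int := [0, 1, 2] ++ List.replicate N.toNat 0
  let K := (PySem.List.pyRange 3 (N+1) 1).foldl ctStepA K0
  PySem.List.pyGetD K N 0

-- ===== PORT B =====
-- weight of a stack frame / of the stack, used only as the termination measure of the loop
def ctW : Int × Bool → Nat
  | (i, true) => 4 ^ i.toNat
  | (i, false) => 2 * 4 ^ i.toNat

def ctPhi (st : List (Int × Bool)) : Nat := (st.map ctW).sum

lemma ctPhi_cons (f : Int × Bool) (rest : List (Int × Bool)) :
    ctPhi (f :: rest) = ctW f + ctPhi rest := by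
  simp [ctPhi]

-- B's `while stack:` loop; the stack's head is its top (Python's list end).
-- memo[i-1] etc. are ported as getD _ 0: on every state the loop reaches they are
-- present (proved below), so Python's KeyError cannot occur.
def ctLoopB : List (Int × Bool) → PySem.Dict Int Int → PySem.Dict Int Int
  | [], memo => memo
  | (i, true) :: rest, memo =>
    let v := memo.getD (i-1) 0 + memo.getD (i-2) 0
    let v := if PySem.Int.mod i 3 == 0 then v + memo.getD (PySem.Int.floordiv i 3) 0 else v
    ctLoopB rest (memo.insert i v)
  | (i, false) :: rest, memo =>
    if 3 ≤ i ∧ ¬ memo.contains i then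
      ctLoopB ((i-2, false) :: (i-1, false) :: (i, true) :: rest) memo
    else
      ctLoopB rest memo
  termination_by st _ => ctPhi st
  decreasing_by
  · simp only [ctPhi_cons, ctW]
    have : 1 ≤ 4 ^ i.toNat := Nat.one_le_pow _ _ (by norm_num)
    omega
  · rename_i h
    simp only [ctPhi_cons, ctW]
    obtain ⟨h3, -⟩ := h
    obtain ⟨m, h0, h1, h2⟩ : ∃ m, i.toNat = m + 2 ∧ (i-1).toNat = m + 1 ∧ (i-2).toNat = m := by
      exact ⟨i.toNat - 2, by omega, by omega, by omega⟩
    rw [h0, h1, h2]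
    have hx : 1 ≤ 4 ^ m := Nat.one_le_pow _ _ (by norm_num)
    simp only [pow_succ]
    set x := 4 ^ m
    omega
  · simp only [ctPhi_cons, ctW]
    have : 1 ≤ 4 ^ i.toNat := Nat.one_le_pow _ _ (by norm_num)
    omega

-- B's initial memo {0: 0, 1: 1, 2: 2}
def ctD0 : PySem.Dict Int Int := ((PySem.Dict.empty.insert 0 0).insert 1 1).insert 2 2

def count_trajectories_alt (N : Int) : Int :=
  if N < 3 then PySem.List.pyGetD ([0, 1, 2] : List Int) N 0
  else (ctLoopB [(N, false)] ctD0).getD N 0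

-- ===== PRECONDITION & SPEC =====
-- Pre_ excludes N ≤ -4, where A raises IndexError on the final K[N] (B's [0,1,2][N] raises too).
def Pre_count_trajectories (N : Int) : Prop := -3 ≤ N
instance (N : Int) : Decidable (Pre_count_trajectories N) := by unfold Pre_count_trajectories; infer_instance
def pvWitness_count_trajectories : Int := 9

def Spec_count_trajectories (N : Int) (out : Int) : Prop := out = count_trajectories_alt N
instance (N : Int) (out : Int) : Decidable (Spec_count_trajectories N out) := by unfold Spec_count_trajectories; infer_instance

-- ===== CLAIM (what is proved, stated in full; the proofs are below) =====
def Claim_equal_count_trajectories : Prop := ∀ (N : Int), Dom_count_trajectories N → Pre_count_trajectories N → Spec_count_trajectories N (count_trajectories N)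

-- ===== LEMMAS AND PROOFS =====

-- the recurrence both programs compute: f n = n for n < 3, else f(n-1)+f(n-2)(+f(n/3) when 3∣n)
def ctF : Nat → Int
  | n =>
    if _h : n < 3 then (n : Int)
    else ctF (n-1) + ctF (n-2) + (if n % 3 = 0 then ctF (n/3) else 0)
  termination_by n => n
  decreasing_by all_goals omega

lemma ctF_small {n : Nat} (h : n < 3) : ctF n = (n : Int) := by
  rw [ctF]; simp [h]

lemma ctF_step {n : Nat} (h : 3 ≤ n) :
    ctF n = ctF (n-1) + ctF (n-2) + (if n % 3 = 0 then ctF (n/3) else 0) := by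
  rw [ctF]; simp [Nat.not_lt.mpr h]

lemma ctmod (m : Nat) : (PySem.Int.mod ((m : Nat) : Int) 3 == 0) = decide (m % 3 = 0) := by
  rw [show (3:Int) = ((3:Nat):Int) from rfl, PySem.Int.mod_natCast]
  by_cases h3 : m % 3 = 0
  · simp [h3]
  · simp [h3]; omega

lemma ctdiv (m : Nat) : PySem.Int.floordiv ((m : Nat) : Int) 3 = ((m/3 : Nat) : Int) := by
  rw [show (3:Int) = ((3:Nat):Int) from rfl, PySem.Int.floordiv_natCast]

-- A-side loop invariant: after the loop has run up to bound m, slot j holds ctF j for every j ≤ m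
lemma ctA_inv (N : Int) (hN : 3 ≤ N) (m : Nat) (hm2 : 2 ≤ m) (hmN : (m : Int) ≤ N) :
    (((PySem.List.pyRange 3 ((m : Int)+1) 1).foldl ctStepA
        ([0, 1, 2] ++ List.replicate N.toNat 0)).length = N.toNat + 3) ∧
    (∀ j : Nat, j ≤ m →
      PySem.List.pyGetD ((PySem.List.pyRange 3 ((m : Int)+1) 1).foldl ctStepA
        ([0, 1, 2] ++ List.replicate N.toNat 0)) (j : Int) 0 = ctF j) := by
  induction m with
  | zero => omega
  | succ m ih =>
    by_cases hm : 2 ≤ m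
    · have ih' := ih hm (by push_cast at hmN ⊢; omega)
      have hsplit : PySem.List.pyRange 3 (((m+1 : Nat) : Int) + 1) 1
          = PySem.List.pyRange 3 ((m : Int) + 1) 1 ++ [((m+1 : Nat) : Int)] := by
        have := PySem.List.pyRange_one_succ_right (a := 3) (b := (m : Int) + 1) (by omega)
        push_cast
        simpa using this
      set L := (PySem.List.pyRange 3 ((m : Int)+1) 1).foldl ctStepA
        ([0, 1, 2] ++ List.replicate N.toNat 0) with hL
      have hlen : L.length = N.toNat + 3 := ih'.1
      have hin : (m + 1 : Nat) < L.length := by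
        have : ((m:Int)+1) ≤ N := by exact_mod_cast hmN
        omega
      have hget1 : PySem.List.pyGetD L (((m+1 : Nat) : Int) - 1) 0 = ctF m := by
        have h : (((m+1 : Nat) : Int) - 1) = ((m : Nat) : Int) := by push_cast; ring
        rw [h]; exact ih'.2 m (le_refl m)
      have hget2 : PySem.List.pyGetD L (((m+1 : Nat) : Int) - 2) 0 = ctF (m - 1) := by
        have h : (((m+1 : Nat) : Int) - 2) = ((m - 1 : Nat) : Int) := by push_cast [hm]; omega
        rw [h]; exact ih'.2 (m-1) (by omega)
      have hget3 : PySem.List.pyGetD L (PySem.Int.floordiv ((m+1 : Nat) : Int) 3) 0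
          = ctF ((m+1)/3) := by
        rw [ctdiv]; exact ih'.2 ((m+1)/3) (by omega)
      have hstep : (PySem.List.pyRange 3 (((m+1 : Nat) : Int) + 1) 1).foldl ctStepA
          ([0, 1, 2] ++ List.replicate N.toNat 0)
          = PySem.List.pySetD L ((m+1 : Nat) : Int) (ctF (m+1)) := by
        rw [hsplit, List.foldl_append]
        simp only [List.foldl_cons, List.foldl_nil, ← hL]
        unfold ctStepA
        rw [ctmod, hget1, hget2, hget3]
        rw [ctF_step (n := m+1) (by omega)]
        by_cases h3 : (m+1) % 3 = 0 <;> simp [h3]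
      constructor
      · rw [hstep, PySem.List.length_pySetD, hlen]
      · intro j hj
        rw [hstep]
        rw [PySem.List.pyGetD_pySetD_natCast (hn := hin)]
        by_cases hje : j = m+1
        · rw [if_pos hje, hje]
        · rw [if_neg hje]
          exact ih'.2 j (by omega)
    · have hm1 : m = 1 := by omega
      subst hm1
      have hnil : PySem.List.pyRange 3 (((1+1 : Nat) : Int) + 1) 1 = [] := by decide
      rw [hnil]
      constructor
      · simp
      · intro j hj
        simp only [List.foldl_nil]
        rw [PySem.List.pyGetD_natCast]
        interval_cases j <;> simp [ctF_small, List.getD]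

-- B-side memo invariant: every entry is at a Nat key n and holds ctF n; the key set is
-- downward closed; and 2 (hence 0 and 1) is present
def ctInv (d : PySem.Dict Int Int) : Prop :=
  (∀ k v, d.get? k = some v → ∃ n : Nat, k = (n : Int) ∧ v = ctF n) ∧
  (∀ n : Nat, d.contains ((n : Nat) : Int) = true → ∀ j : Nat, j ≤ n → d.contains ((j : Nat) : Int) = true) ∧
  d.contains 2 = true

lemma ctInv_getD {d : PySem.Dict Int Int} (hd : ctInv d) (n : Nat)
    (hc : d.contains ((n : Nat) : Int) = true) : d.getD ((n : Nat) : Int) 0 = ctF n := by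
  have := PySem.Dict.contains_eq_isSome_get? (d := d) (k := ((n : Nat) : Int))
  rw [hc] at this
  obtain ⟨v, hv⟩ := Option.isSome_iff_exists.mp this.symm
  obtain ⟨m, hk, hval⟩ := hd.1 _ _ hv
  have hnm : n = m := by exact_mod_cast hk
  rw [PySem.Dict.getD_eq_get?_getD, hv, hval, hnm]
  rfl

lemma ctInv_insert {d : PySem.Dict Int Int} (hd : ctInv d) (n : Nat)
    (hdown : ∀ j : Nat, j ≤ n → d.contains ((j : Nat) : Int) = true ∨ j = n) :
    ctInv (d.insert ((n : Nat) : Int) (ctF n)) := by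
  refine ⟨?_, ?_, ?_⟩
  · intro k v hv
    rw [PySem.Dict.get?_insert] at hv
    by_cases hk : k = ((n : Nat) : Int)
    · rw [if_pos hk] at hv
      exact ⟨n, hk, (Option.some_inj.mp hv).symm⟩
    · rw [if_neg hk] at hv
      exact hd.1 _ _ hv
  · intro m hm j hj
    rw [PySem.Dict.contains_insert] at hm ⊢
    by_cases hjn : (j : Int) = ((n : Nat) : Int)
    · rw [hjn]
      simp
    · rw [show ((j : Int) == ((n : Nat) : Int)) = false from beq_eq_false_iff_ne.mpr hjn,
        Bool.false_or]
      by_cases hmn : ((m : Nat) : Int) = ((n : Nat) : Int)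
      · have : m = n := by exact_mod_cast hmn
        subst this
        rcases hdown j (by omega) with h | h
        · exact h
        · exact absurd (by exact_mod_cast congrArg (Nat.cast : Nat → Int) h) hjn
      · rw [show ((m : Int) == ((n : Nat) : Int)) = false from beq_eq_false_iff_ne.mpr hmn,
          Bool.false_or] at hm
        exact hd.2.1 m hm j hj
  · rw [PySem.Dict.contains_insert]
    simp [hd.2.2]

-- processing one not-ready frame (↑n, false): the loop continues with the rest of the
-- stack and a memo that still satisfies the invariant, grew monotonically, and now
-- contains every index ≤ n
lemma ctB_frame : ∀ n : Nat, ∀ (d : PySem.Dict Int Int) (rest : List (Int × Bool)), ctInv d →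
    ∃ d', ctLoopB ((((n : Nat) : Int), false) :: rest) d = ctLoopB rest d' ∧ ctInv d' ∧
      (∀ k, d.contains k = true → d'.contains k = true) ∧
      (∀ j : Nat, j ≤ n → d'.contains ((j : Nat) : Int) = true) := by
  intro n
  induction n using Nat.strong_induction_on with
  | _ n ih =>
    intro d rest hd
    by_cases hn3 : 3 ≤ n
    · by_cases hc : d.contains ((n : Nat) : Int) = true
      · -- already memoized: the frame is skipped
        refine ⟨d, ?_, hd, fun k h => h, fun j hj => hd.2.1 n hc j hj⟩
        rw [ctLoopB, if_neg (by simp [hc])]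
      · -- expand: push (n, true) and the two predecessor frames
        have e1 : ((n : Nat) : Int) - 1 = ((n-1 : Nat) : Int) := by omega
        have e2 : ((n : Nat) : Int) - 2 = ((n-2 : Nat) : Int) := by omega
        obtain ⟨d1, heq1, hinv1, hmono1, hall1⟩ :=
          ih (n-2) (by omega) d (((((n : Nat) : Int)) - 1, false) :: ((((n : Nat) : Int)), true) :: rest) hd
        obtain ⟨d2, heq2, hinv2, hmono2, hall2⟩ :=
          ih (n-1) (by omega) d1 (((((n : Nat) : Int)), true) :: rest) hinv1
        have hg1 : d2.getD (((n : Nat) : Int) - 1) 0 = ctF (n-1) := by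
          rw [e1]; exact ctInv_getD hinv2 (n-1) (hall2 (n-1) (le_refl _))
        have hg2 : d2.getD (((n : Nat) : Int) - 2) 0 = ctF (n-2) := by
          rw [e2]; exact ctInv_getD hinv2 (n-2) (hall2 (n-2) (by omega))
        have hg3 : d2.getD ((((n/3 : Nat)) : Int)) 0 = ctF (n/3) :=
          ctInv_getD hinv2 (n/3) (hall2 (n/3) (by omega))
        have hstepT : ctLoopB ((((n : Nat) : Int), true) :: rest) d2
            = ctLoopB rest (d2.insert ((n : Nat) : Int) (ctF n)) := by
          rw [ctLoopB]
          simp only [hg1, hg2, ctmod, ctdiv, hg3]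
          rw [ctF_step hn3]
          by_cases h3 : n % 3 = 0
          · simp [h3]
          · simp [h3]
        have hdown : ∀ j : Nat, j ≤ n → d2.contains ((j : Nat) : Int) = true ∨ j = n := by
          intro j hj
          by_cases hje : j = n
          · exact Or.inr hje
          · exact Or.inl (hall2 j (by omega))
        refine ⟨d2.insert ((n : Nat) : Int) (ctF n), ?_, ctInv_insert hinv2 n hdown, ?_, ?_⟩
        · rw [ctLoopB, if_pos ⟨by exact_mod_cast hn3, by simp [hc]⟩, e2, heq1, e1, heq2, hstepT]
        · intro k hk
          rw [PySem.Dict.contains_insert]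
          simp [hmono2 k (hmono1 k hk)]
        · intro j hj
          rw [PySem.Dict.contains_insert]
          by_cases hje : j = n
          · simp [hje]
          · simp [hall2 j (by omega)]
    · -- n < 3: n is pre-seeded in the memo, the frame is skipped
      have hc : d.contains ((n : Nat) : Int) = true := hd.2.1 2 hd.2.2 n (by omega)
      refine ⟨d, ?_, hd, fun k h => h, fun j hj => hd.2.1 2 hd.2.2 j (by omega)⟩
      rw [ctLoopB, if_neg (by simp [hc])]

lemma ctInv_d0 : ctInv ctD0 := by
  refine ⟨?_, ?_, by decide⟩
  · intro k v hv
    rw [ctD0, PySem.Dict.get?_insert] at hv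
    by_cases h2 : k = 2
    · rw [if_pos h2] at hv
      exact ⟨2, by simp [h2], by rw [← Option.some_inj.mp hv, ctF_small (by norm_num)]; norm_num⟩
    · rw [if_neg h2, PySem.Dict.get?_insert] at hv
      by_cases h1 : k = 1
      · rw [if_pos h1] at hv
        exact ⟨1, by simp [h1], by rw [← Option.some_inj.mp hv, ctF_small (by norm_num)]; norm_num⟩
      · rw [if_neg h1, PySem.Dict.get?_insert] at hv
        by_cases h0 : k = 0
        · rw [if_pos h0] at hv
          exact ⟨0, by simp [h0], by rw [← Option.some_inj.mp hv, ctF_small (by norm_num)]; norm_num⟩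
        · rw [if_neg h0] at hv
          simp [PySem.Dict.get?_empty] at hv
  · intro m hm j hj
    have hm2 : m ≤ 2 := by
      by_contra hgt
      have : ((m : Nat) : Int) ≠ 0 ∧ ((m : Nat) : Int) ≠ 1 ∧ ((m : Nat) : Int) ≠ 2 := by
        refine ⟨?_, ?_, ?_⟩ <;> omega
      rw [ctD0] at hm
      rw [PySem.Dict.contains_insert, PySem.Dict.contains_insert,
        PySem.Dict.contains_insert] at hm
      simp [beq_eq_false_iff_ne.mpr this.2.2, beq_eq_false_iff_ne.mpr this.2.1,
        beq_eq_false_iff_ne.mpr this.1, PySem.Dict.contains_empty] at hm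
    have hj2 : j ≤ 2 := by omega
    interval_cases j <;> decide

-- after the whole run started on [(N,false)], the memo contains ctF at N
lemma ct_alt_big (N : Int) (h3 : 3 ≤ N) : count_trajectories_alt N = ctF N.toNat := by
  obtain ⟨d', heq, hinv, -, hall⟩ := ctB_frame N.toNat ctD0 [] ctInv_d0
  have hNc : ((N.toNat : Nat) : Int) = N := by omega
  unfold count_trajectories_alt
  rw [if_neg (by omega), ← hNc, heq]
  rw [ctLoopB]
  exact ctInv_getD hinv N.toNat (hall N.toNat (le_refl _))

-- agreement for N ≥ 3: both programs return ctF N.toNat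
lemma ctA_big (N : Int) (h3 : 3 ≤ N) : count_trajectories N = ctF N.toNat := by
  lift N to Nat using (by omega : (0:Int) ≤ N) with n
  have h2 : 2 ≤ n := by have : (3:Int) ≤ (n:Int) := h3; omega
  have hA := ctA_inv (n : Int) (by exact_mod_cast h3) n h2 (le_refl _)
  unfold count_trajectories
  simp only [Int.toNat_natCast] at hA ⊢
  exact hA.2 n (le_refl _)

-- ===== VERDICT (by name: the statement is the Claim_ definition above) =====
theorem count_trajectories_spec : Claim_equal_count_trajectories := by
  intro N _ hpre
  unfold Spec_count_trajectories
  by_cases h3 : 3 ≤ N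
  · rw [ctA_big N h3, ct_alt_big N h3]
  · have hcase : N = -3 ∨ N = -2 ∨ N = -1 ∨ N = 0 ∨ N = 1 ∨ N = 2 := by
      unfold Pre_count_trajectories at hpre; omega
    rcases hcase with h | h | h | h | h | h <;> subst h <;> decide
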